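-- pv_equiv track=rewrite | github.com/Johngh17/CodingChallenges | unique_vowel_substrings.py | get_vowel_substrings
-- ===== SOURCE A (Python) =====
-- def get_vowel_substrings(base):
--     # For checking whether something is a vowel
--     vowels = "AEIOUaeiou"
--
--     # To hold results while avoiding duplicates
--     substrings = set()
--
--     # We need to iterate over the entire string but also need the indices to speed things up
--     for i, char in enumerate(base):
--         # Only do something special if we encounter a vowel
--         if char in vowels:
--             # The problem wants single letters, too, so we'll handle that here
--             substrings.add(char)
--
--             # Check the rest of the string
--             for j, subChar in enumerate(base[i+1:]):
--                 # Any vowel encountered represents the end of a potentially unique substring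
--                 if subChar in vowels:
--                     # Add the substring to the results set
--                     substrings.add(base[i:i+2+j])
--
--     return sorted(list(substrings))
-- ===== SOURCE B (Python) =====
-- def get_vowel_substrings(base):
--     vowels = "AEIOUaeiou"
--     # positions of vowels, collected in one scan
--     idxs = [i for i, ch in enumerate(base) if ch in vowels]
--     result = set()
--     for p in idxs:
--         for q in idxs:
--             if p <= q:
--                 result.add(base[p:q + 1])
--     return sorted(result)
-- ===== Notes on version B (the rewrite author's own statement) =====
-- stated objective: alternative
-- what changed: B scans the string once to collect the list of vowel positions and then enumerates ordered pairs of that position list, instead of A's rescan of the whole remaining string base[i+1:] inside the outer character loop; deduplication and final sort are unchanged.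
import Mathlib
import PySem

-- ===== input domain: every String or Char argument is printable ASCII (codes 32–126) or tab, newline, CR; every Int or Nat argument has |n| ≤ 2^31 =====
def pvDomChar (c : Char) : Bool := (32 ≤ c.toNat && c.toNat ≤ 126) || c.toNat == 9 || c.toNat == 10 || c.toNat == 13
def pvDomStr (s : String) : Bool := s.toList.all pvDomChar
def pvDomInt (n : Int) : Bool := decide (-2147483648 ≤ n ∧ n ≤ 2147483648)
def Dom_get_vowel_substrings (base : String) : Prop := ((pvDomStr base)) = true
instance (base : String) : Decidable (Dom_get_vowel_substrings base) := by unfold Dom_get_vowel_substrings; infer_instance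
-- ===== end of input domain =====

-- B precomputes the list of vowel positions in one scan and enumerates ordered position pairs,
-- instead of A's rescan of the whole remaining string inside the outer character loop (objective: alternative).

def pvVowels : List Char := "AEIOUaeiou".toList

-- ===== PORT A =====
-- transliteration of A: for each enumerated char, if vowel add it, then rescan base[i+1:] and
-- add base[i:i+2+j] for every vowel found; finally sorted(list(set)).
def get_vowel_substrings (base : String) : List String :=
  let bs := base.toList
  let substrings : PySem.Set String :=
    (PySem.List.enumerate bs 0).foldl (fun subs ic =>
      if ic.2 ∈ pvVowels then
        (PySem.List.enumerate (PySem.List.slice bs (some (ic.1 + 1)) none) 0).foldl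
          (fun subs2 jc =>
            if jc.2 ∈ pvVowels then
              PySem.Set.add subs2
                (String.ofList (PySem.List.slice bs (some ic.1) (some (ic.1 + 2 + jc.1))))
            else subs2)
          (PySem.Set.add subs (String.ofList [ic.2]))
      else subs) PySem.Set.empty
  PySem.List.sorted substrings (fun x => x) false

-- ===== PORT B =====
-- transliteration of B: vowel index list built once, then a nested loop over that index list.
def get_vowel_substrings_alt (base : String) : List String :=
  let bs := base.toList
  let idxs : List Int :=
    ((PySem.List.enumerate bs 0).filter (fun ic => decide (ic.2 ∈ pvVowels))).map (·.1)
  let result : PySem.Set String :=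
    idxs.foldl (fun res p =>
      idxs.foldl (fun res2 q =>
        if p ≤ q then
          PySem.Set.add res2 (String.ofList (PySem.List.slice bs (some p) (some (q + 1))))
        else res2) res) PySem.Set.empty
  PySem.List.sorted result (fun x => x) false

-- ===== PRECONDITION & SPEC =====
def Spec_get_vowel_substrings (base : String) (out : List String) : Prop := out = get_vowel_substrings_alt base
instance (base : String) (out : List String) : Decidable (Spec_get_vowel_substrings base out) := by unfold Spec_get_vowel_substrings; infer_instance

-- ===== CLAIM (what is proved, stated in full; the proofs are below) =====
def Claim_equal_get_vowel_substrings : Prop := ∀ (base : String), Dom_get_vowel_substrings base → Spec_get_vowel_substrings base (get_vowel_substrings base)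

-- ===== LEMMAS AND PROOFS =====

-- the common characterization: x is a substring of bs starting and ending at vowel positions
def pvP (bs : List Char) (x : String) : Prop :=
  ∃ p q : Nat, p ≤ q ∧ q < bs.length ∧ bs.getD p ' ' ∈ pvVowels ∧ bs.getD q ' ' ∈ pvVowels ∧
    x = String.ofList ((bs.drop p).take (q + 1 - p))

theorem mem_foldl_step {α β : Type} (step : List α → β → List α) (Q : β → α → Prop)
    (hstep : ∀ acc y x, x ∈ step acc y ↔ x ∈ acc ∨ Q y x) :
    ∀ (l : List β) (init : List α) (x : α),
      x ∈ l.foldl step init ↔ x ∈ init ∨ ∃ y ∈ l, Q y x := by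
  intro l
  induction l with
  | nil => simp
  | cons y l ih =>
    intro init x
    simp only [List.foldl_cons, ih, hstep, List.mem_cons]
    constructor
    · rintro (⟨h | h⟩ | ⟨z, hz, hq⟩)
      · exact .inl h
      · exact .inr ⟨y, .inl rfl, h⟩
      · exact .inr ⟨z, .inr hz, hq⟩
    · rintro (h | ⟨z, (rfl | hz), hq⟩)
      · exact .inl (.inl h)
      · exact .inl (.inr hq)
      · exact .inr ⟨z, hz, hq⟩

theorem nodup_foldl_step {α β : Type} (step : List α → β → List α)
    (hstep : ∀ acc y, acc.Nodup → (step acc y).Nodup) :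
    ∀ (l : List β) (init : List α), init.Nodup → (l.foldl step init).Nodup := by
  intro l
  induction l with
  | nil => simp only [List.foldl_nil]; exact fun _ h => h
  | cons y l ih => intro init h; exact ih _ (hstep _ _ h)


theorem take1_drop (bs : List Char) (k : Nat) (hk : k < bs.length) :
    (bs.drop k).take 1 = [bs[k]] := by
  rw [List.drop_eq_getElem_cons hk]
  simp only [List.take_succ_cons, List.take_zero]

-- membership in A's nested fold, in enumerate form
theorem memA (bs : List Char) (x : String) :
    x ∈ (PySem.List.enumerate bs 0).foldl (fun subs ic =>
      if ic.2 ∈ pvVowels then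
        (PySem.List.enumerate (PySem.List.slice bs (some (ic.1 + 1)) none) 0).foldl
          (fun subs2 jc =>
            if jc.2 ∈ pvVowels then
              PySem.Set.add subs2
                (String.ofList (PySem.List.slice bs (some ic.1) (some (ic.1 + 2 + jc.1))))
            else subs2)
          (PySem.Set.add subs (String.ofList [ic.2]))
      else subs) PySem.Set.empty
    ↔ ∃ ic ∈ PySem.List.enumerate bs 0, ic.2 ∈ pvVowels ∧
        (x = String.ofList [ic.2] ∨
         ∃ jc ∈ PySem.List.enumerate (PySem.List.slice bs (some (ic.1 + 1)) none) 0,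
           jc.2 ∈ pvVowels ∧
           x = String.ofList (PySem.List.slice bs (some ic.1) (some (ic.1 + 2 + jc.1)))) := by
  have hstep : ∀ (acc : List String) (ic : Int × Char) (y : String),
      (y ∈ if ic.2 ∈ pvVowels then
        (PySem.List.enumerate (PySem.List.slice bs (some (ic.1 + 1)) none) 0).foldl
          (fun subs2 jc =>
            if jc.2 ∈ pvVowels then
              PySem.Set.add subs2
                (String.ofList (PySem.List.slice bs (some ic.1) (some (ic.1 + 2 + jc.1))))
            else subs2)
          (PySem.Set.add acc (String.ofList [ic.2]))
      else acc) ↔ y ∈ acc ∨ (ic.2 ∈ pvVowels ∧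
        (y = String.ofList [ic.2] ∨
         ∃ jc ∈ PySem.List.enumerate (PySem.List.slice bs (some (ic.1 + 1)) none) 0,
           jc.2 ∈ pvVowels ∧
           y = String.ofList (PySem.List.slice bs (some ic.1) (some (ic.1 + 2 + jc.1))))) := by
    intro acc ic y
    have hin : ∀ (acc2 : List String) (jc : Int × Char) (z : String),
        (z ∈ if jc.2 ∈ pvVowels then
            PySem.Set.add acc2
              (String.ofList (PySem.List.slice bs (some ic.1) (some (ic.1 + 2 + jc.1))))
          else acc2) ↔ z ∈ acc2 ∨ (jc.2 ∈ pvVowels ∧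
            z = String.ofList (PySem.List.slice bs (some ic.1) (some (ic.1 + 2 + jc.1)))) := by
      intro acc2 jc z
      by_cases hw : jc.2 ∈ pvVowels
      · rw [if_pos hw, PySem.Set.mem_add]; tauto
      · rw [if_neg hw]; tauto
    by_cases hv : ic.2 ∈ pvVowels
    · rw [if_pos hv,
        mem_foldl_step _ (fun jc z => jc.2 ∈ pvVowels ∧
          z = String.ofList (PySem.List.slice bs (some ic.1) (some (ic.1 + 2 + jc.1)))) hin,
        PySem.Set.mem_add]
      tauto
    · rw [if_neg hv]; tauto
  rw [mem_foldl_step _ _ hstep]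
  simp [PySem.Set.empty]

-- membership in B's nested fold, in index-list form
theorem memB (bs : List Char) (idxs : List Int) (x : String) :
    x ∈ idxs.foldl (fun res p =>
      idxs.foldl (fun res2 q =>
        if p ≤ q then
          PySem.Set.add res2 (String.ofList (PySem.List.slice bs (some p) (some (q + 1))))
        else res2) res) PySem.Set.empty
    ↔ ∃ p ∈ idxs, ∃ q ∈ idxs, p ≤ q ∧
        x = String.ofList (PySem.List.slice bs (some p) (some (q + 1))) := by
  have hstep : ∀ (acc : List String) (p : Int) (y : String),
      (y ∈ idxs.foldl (fun res2 q =>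
        if p ≤ q then
          PySem.Set.add res2 (String.ofList (PySem.List.slice bs (some p) (some (q + 1))))
        else res2) acc) ↔ y ∈ acc ∨ (∃ q ∈ idxs, p ≤ q ∧
          y = String.ofList (PySem.List.slice bs (some p) (some (q + 1)))) := by
    intro acc p y
    have hin : ∀ (acc2 : List String) (q : Int) (z : String),
        (z ∈ if p ≤ q then
            PySem.Set.add acc2 (String.ofList (PySem.List.slice bs (some p) (some (q + 1))))
          else acc2) ↔ z ∈ acc2 ∨ (p ≤ q ∧
            z = String.ofList (PySem.List.slice bs (some p) (some (q + 1)))) := by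
      intro acc2 q z
      by_cases hle : p ≤ q
      · rw [if_pos hle, PySem.Set.mem_add]; tauto
      · rw [if_neg hle]; tauto
    rw [mem_foldl_step _ (fun q z => p ≤ q ∧
          z = String.ofList (PySem.List.slice bs (some p) (some (q + 1)))) hin]
  rw [mem_foldl_step _ _ hstep]
  simp [PySem.Set.empty]

theorem memA_iff_P (bs : List Char) (x : String) :
    (∃ ic ∈ PySem.List.enumerate bs 0, ic.2 ∈ pvVowels ∧
        (x = String.ofList [ic.2] ∨
         ∃ jc ∈ PySem.List.enumerate (PySem.List.slice bs (some (ic.1 + 1)) none) 0,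
           jc.2 ∈ pvVowels ∧
           x = String.ofList (PySem.List.slice bs (some ic.1) (some (ic.1 + 2 + jc.1)))))
    ↔ pvP bs x := by
  constructor
  · rintro ⟨ic, hic, hv, hx⟩
    rw [PySem.List.mem_enumerate_iff] at hic
    obtain ⟨k, hk, rfl⟩ := hic
    simp only [] at hv hx
    have hk1 : ((0:Int) + k + 1) = ((k + 1 : Nat) : Int) := by push_cast; ring
    rw [hk1, PySem.List.slice_from_natCast] at hx
    rcases hx with hx | ⟨jc, hjc, hw, hx⟩
    · refine ⟨k, k, le_rfl, hk, ?_, ?_, ?_⟩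
      · rw [List.getD_eq_getElem _ _ hk]; exact hv
      · rw [List.getD_eq_getElem _ _ hk]; exact hv
      · rw [hx]
        congr 1
        have h1 : k + 1 - k = 1 := by omega
        rw [h1, take1_drop bs k hk]
    · rw [PySem.List.mem_enumerate_iff] at hjc
      obtain ⟨j, hj, rfl⟩ := hjc
      simp only [] at hw hx
      have hj' : j < bs.length - (k + 1) := by simpa using hj
      rw [List.getElem_drop] at hw
      refine ⟨k, k + 1 + j, by omega, by omega, ?_, ?_, ?_⟩
      · rw [List.getD_eq_getElem _ _ hk]; exact hv
      · rw [List.getD_eq_getElem _ _ (by omega)]; exact hw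
      · rw [hx]
        congr 1
        have : ((0:Int) + k + 2 + (0 + j)) = ((k + 2 + j : Nat) : Int) := by push_cast; ring
        rw [this]
        have h0 : ((0:Int) + k) = ((k : Nat) : Int) := by ring
        rw [h0, PySem.List.slice_natCast]
        congr 1
        omega
  · rintro ⟨p, q, hpq, hq, hvp, hvq, rfl⟩
    have hp : p < bs.length := by omega
    rw [List.getD_eq_getElem _ _ hp] at hvp
    rw [List.getD_eq_getElem _ _ hq] at hvq
    refine ⟨((0:Int) + p, bs[p]), ?_, hvp, ?_⟩
    · rw [PySem.List.mem_enumerate_iff]; exact ⟨p, hp, rfl⟩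
    · rcases Nat.eq_or_lt_of_le hpq with rfl | hlt
      · left
        congr 1
        have h1 : p + 1 - p = 1 := by omega
        rw [h1, take1_drop bs p hp]
      · right
        have hk1 : ((0:Int) + p + 1) = ((p + 1 : Nat) : Int) := by push_cast; ring
        rw [hk1, PySem.List.slice_from_natCast]
        have hj : q - p - 1 < (bs.drop (p + 1)).length := by
          rw [List.length_drop]; omega
        refine ⟨((0:Int) + (q - p - 1 : Nat), (bs.drop (p + 1))[q - p - 1]), ?_, ?_, ?_⟩
        · rw [PySem.List.mem_enumerate_iff]; exact ⟨q - p - 1, hj, rfl⟩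
        · rw [List.getElem_drop]
          have : p + 1 + (q - p - 1) = q := by omega
          simp only [this]; exact hvq
        · congr 1
          have : ((0:Int) + p + 2 + (0 + (q - p - 1 : Nat))) = ((p + 2 + (q - p - 1) : Nat) : Int) := by
            push_cast; ring
          rw [this]
          have h0 : ((0:Int) + p) = ((p : Nat) : Int) := by ring
          rw [h0, PySem.List.slice_natCast]
          congr 1
          omega

theorem memB_iff_P (bs : List Char) (x : String) :
    (∃ p ∈ ((PySem.List.enumerate bs 0).filter (fun ic => decide (ic.2 ∈ pvVowels))).map (·.1),
       ∃ q ∈ ((PySem.List.enumerate bs 0).filter (fun ic => decide (ic.2 ∈ pvVowels))).map (·.1),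
         p ≤ q ∧ x = String.ofList (PySem.List.slice bs (some p) (some (q + 1))))
    ↔ pvP bs x := by
  have hidx : ∀ p : Int,
      p ∈ ((PySem.List.enumerate bs 0).filter (fun ic => decide (ic.2 ∈ pvVowels))).map (·.1) ↔
      ∃ k : Nat, k < bs.length ∧ bs.getD k ' ' ∈ pvVowels ∧ p = (k : Int) := by
    intro p
    simp only [List.mem_map, List.mem_filter, PySem.List.mem_enumerate_iff]
    constructor
    · rintro ⟨ic, ⟨⟨k, hk, rfl⟩, hv⟩, rfl⟩
      simp only [decide_eq_true_eq] at hv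
      exact ⟨k, hk, by rw [List.getD_eq_getElem _ _ hk]; exact hv, by push_cast; ring⟩
    · rintro ⟨k, hk, hv, rfl⟩
      rw [List.getD_eq_getElem _ _ hk] at hv
      exact ⟨((0:Int) + k, bs[k]), ⟨⟨k, hk, rfl⟩, by simpa using hv⟩, by push_cast; ring⟩
  constructor
  · rintro ⟨p, hp, q, hq, hle, rfl⟩
    rw [hidx] at hp hq
    obtain ⟨k, hk, hvk, rfl⟩ := hp
    obtain ⟨m, hm, hvm, rfl⟩ := hq
    have hkm : k ≤ m := by exact_mod_cast hle
    refine ⟨k, m, hkm, hm, hvk, hvm, ?_⟩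
    congr 1
    have : ((m : Int) + 1) = ((m + 1 : Nat) : Int) := by push_cast; ring
    rw [this, PySem.List.slice_natCast]
  · rintro ⟨p, q, hpq, hq, hvp, hvq, rfl⟩
    have hp : p < bs.length := by omega
    refine ⟨(p : Int), ?_, (q : Int), ?_, by exact_mod_cast hpq, ?_⟩
    · rw [hidx]
      exact ⟨p, hp, hvp, rfl⟩
    · rw [hidx]
      exact ⟨q, hq, hvq, rfl⟩
    · congr 1
      have : ((q : Int) + 1) = ((q + 1 : Nat) : Int) := by push_cast; ring
      rw [this, PySem.List.slice_natCast]

theorem nodupA (bs : List Char) :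
    ((PySem.List.enumerate bs 0).foldl (fun subs ic =>
      if ic.2 ∈ pvVowels then
        (PySem.List.enumerate (PySem.List.slice bs (some (ic.1 + 1)) none) 0).foldl
          (fun subs2 jc =>
            if jc.2 ∈ pvVowels then
              PySem.Set.add subs2
                (String.ofList (PySem.List.slice bs (some ic.1) (some (ic.1 + 2 + jc.1))))
            else subs2)
          (PySem.Set.add subs (String.ofList [ic.2]))
      else subs) PySem.Set.empty : List String).Nodup := by
  apply nodup_foldl_step
  · intro acc ic h
    by_cases hv : ic.2 ∈ pvVowels
    · simp only [hv, if_true]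
      apply nodup_foldl_step
      · intro acc2 jc h2
        by_cases hw : jc.2 ∈ pvVowels
        · simp only [hw, if_true]; exact PySem.Set.nodup_add _ _ h2
        · simpa [hw] using h2
      · exact PySem.Set.nodup_add _ _ h
    · simpa [hv] using h
  · simp [PySem.Set.empty]

theorem nodupB (bs : List Char) (idxs : List Int) :
    (idxs.foldl (fun res p =>
      idxs.foldl (fun res2 q =>
        if p ≤ q then
          PySem.Set.add res2 (String.ofList (PySem.List.slice bs (some p) (some (q + 1))))
        else res2) res) PySem.Set.empty : List String).Nodup := by
  apply nodup_foldl_step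
  · intro acc p h
    apply nodup_foldl_step
    · intro acc2 q h2
      by_cases hle : p ≤ q
      · simp only [hle, if_true]; exact PySem.Set.nodup_add _ _ h2
      · simpa [hle] using h2
    · exact h
  · simp [PySem.Set.empty]

theorem get_vowel_substrings_spec : Claim_equal_get_vowel_substrings := by
  intro base _
  unfold Spec_get_vowel_substrings get_vowel_substrings get_vowel_substrings_alt
  simp only []
  apply (PySem.List.sorted_id_eq_sorted_id_iff_perm _ _).mpr
  rw [List.perm_ext_iff_of_nodup (nodupA base.toList) (nodupB base.toList _)]
  intro x
  rw [memA, memB, memA_iff_P, memB_iff_P]
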